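-- pv_equiv track=rewrite | github.com/NenausnikovKV/personal_library | NLP/processing_plan_text.py | unit_upper_case_register_sequence_sentence
-- ===== SOURCE A (Python) =====
-- def unit_upper_case_register_sequence_sentence(sentence_texts):
--     num = 1
--     while num < len(sentence_texts):
--         sentence_text1 = sentence_texts[num]
--         sentence_text2 = sentence_texts[num - 1]
--         if sentence_text1.isupper() and sentence_text2.isupper():
--             sentence_texts.pop(num)
--             sentence_texts[num-1] = sentence_text1 + sentence_text2
--         num+=1
--     return sentence_texts
-- ===== SOURCE B (Python) =====
-- def unit_upper_case_register_sequence_sentence(sentence_texts):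
--     # A mutates its argument in place; B does not (the return value is what is compared).
--     out = []
--     i = 0
--     n = len(sentence_texts)
--     while i < n:
--         if i + 1 < n and sentence_texts[i].isupper() and sentence_texts[i + 1].isupper():
--             out.append(sentence_texts[i + 1] + sentence_texts[i])
--             i += 2
--         else:
--             out.append(sentence_texts[i])
--             i += 1
--     return out
-- ===== Notes on version B (the rewrite author's own statement) =====
-- stated objective: alternative
-- what changed: Replaces A's in-place scan with mid-list pop() and index overwrite by a single left-to-right pass that builds a fresh output list and jumps the index by two on a merge, avoiding all mid-list mutation; A mutates its argument in place, B leaves it untouched (return values agree).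
import Mathlib
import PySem

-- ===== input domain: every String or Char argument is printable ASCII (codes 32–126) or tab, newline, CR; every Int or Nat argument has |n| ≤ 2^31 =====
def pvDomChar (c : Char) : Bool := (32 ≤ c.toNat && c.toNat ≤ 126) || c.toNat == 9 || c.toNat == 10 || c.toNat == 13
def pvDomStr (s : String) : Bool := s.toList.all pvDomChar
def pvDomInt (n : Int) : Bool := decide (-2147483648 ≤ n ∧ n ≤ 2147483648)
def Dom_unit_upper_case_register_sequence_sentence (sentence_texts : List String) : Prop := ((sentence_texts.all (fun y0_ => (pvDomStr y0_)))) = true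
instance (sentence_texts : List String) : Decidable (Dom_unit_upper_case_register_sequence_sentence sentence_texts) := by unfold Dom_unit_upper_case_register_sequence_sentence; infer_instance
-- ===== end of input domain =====

-- B replaces A's in-place pop-and-overwrite scan with a single left-to-right pass that
-- builds a new list, jumping the index by two on a merge; A mutates its argument in place,
-- B does not — the equivalence proved here is about the return value.

-- str.isupper(): at least one cased character and no lowercase one; exact on the ASCII domain
-- (Dom), where the cased characters are exactly the letters.
def pyStrIsupper (s : String) : Bool :=
  (s.toList.any (fun c => PySem.Chars.isupper c || PySem.Chars.islower c)) &&
  (s.toList.all (fun c => !PySem.Chars.islower c))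

-- ===== PORT A =====
-- the while loop: state = (current list, num); pop(num) = eraseIdx, assignment = set
def uucLoopA (xs : List String) (num : Nat) : List String :=
  if h : num < xs.length then
    let t1 := xs[num]
    let t2 := xs[num - 1]!
    if pyStrIsupper t1 && pyStrIsupper t2 then
      uucLoopA (((xs.eraseIdx num).set (num - 1) (t1 ++ t2))) (num + 1)
    else
      uucLoopA xs (num + 1)
  else xs
termination_by xs.length - num
decreasing_by
  · simp [List.length_set, List.length_eraseIdx, h]; omega
  · omega

def unit_upper_case_register_sequence_sentence (sentence_texts : List String) : List String :=
  uucLoopA sentence_texts 1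

-- ===== PORT B =====
-- the while loop of Source B: out is built front-to-back (here by cons), i jumps by 2 on a merge
def uucLoopB (xs : List String) (i : Nat) : List String :=
  if h : i < xs.length then
    if h2 : i + 1 < xs.length then
      if pyStrIsupper xs[i] && pyStrIsupper xs[i + 1] then
        (xs[i + 1] ++ xs[i]) :: uucLoopB xs (i + 2)
      else
        xs[i] :: uucLoopB xs (i + 1)
    else
      xs[i] :: uucLoopB xs (i + 1)
  else []
termination_by xs.length - i

def unit_upper_case_register_sequence_sentence_alt (sentence_texts : List String) : List String :=
  uucLoopB sentence_texts 0

-- ===== PRECONDITION & SPEC =====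
def Spec_unit_upper_case_register_sequence_sentence (sentence_texts : List String) (out : List String) : Prop := out = unit_upper_case_register_sequence_sentence_alt sentence_texts
instance (sentence_texts : List String) (out : List String) : Decidable (Spec_unit_upper_case_register_sequence_sentence sentence_texts out) := by unfold Spec_unit_upper_case_register_sequence_sentence; infer_instance

-- ===== CLAIM (what is proved, stated in full; the proofs are below) =====
def Claim_equal_unit_upper_case_register_sequence_sentence : Prop := ∀ (sentence_texts : List String), Dom_unit_upper_case_register_sequence_sentence sentence_texts → Spec_unit_upper_case_register_sequence_sentence sentence_texts (unit_upper_case_register_sequence_sentence sentence_texts)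

-- ===== LEMMAS AND PROOFS =====

-- structural description of the pair-merging pass, used as the bridge between the two loops
def uucMerge : List String → List String
  | a :: b :: rest =>
      if pyStrIsupper a && pyStrIsupper b then (b ++ a) :: uucMerge rest
      else a :: uucMerge (b :: rest)
  | xs => xs

theorem uucMerge_short (xs : List String) (h : xs.length ≤ 1) : uucMerge xs = xs := by
  match xs, h with
  | [], _ => rfl
  | [a], _ => rfl

theorem uucLoopB_eq_merge (k : Nat) (xs : List String) (i : Nat) (hk : xs.length - i ≤ k) :
    uucLoopB xs i = uucMerge (xs.drop i) := by
  induction k generalizing i with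
  | zero =>
    rw [uucLoopB, dif_neg (by omega), List.drop_eq_nil_of_le (by omega),
      uucMerge_short _ (by simp)]
  | succ k ih =>
    rw [uucLoopB]
    by_cases h : i < xs.length
    · by_cases h2 : i + 1 < xs.length
      · have hd1 : xs.drop i = xs[i]'h :: xs.drop (i + 1) := List.drop_eq_getElem_cons h
        have hd2 : xs.drop (i + 1) = xs[i + 1]'h2 :: xs.drop (i + 2) := List.drop_eq_getElem_cons h2
        by_cases hc : (pyStrIsupper (xs[i]'h) && pyStrIsupper (xs[i + 1]'h2)) = true
        · rw [dif_pos h, dif_pos h2, if_pos hc, ih (i + 2) (by omega), hd1, hd2, uucMerge,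
            if_pos hc]
        · rw [dif_pos h, dif_pos h2, if_neg hc, ih (i + 1) (by omega), hd1]
          conv_rhs => rw [hd2, uucMerge, if_neg hc, ← hd2]
      · have hd1 : xs.drop i = [xs[i]'h] := by
          rw [List.drop_eq_getElem_cons h, List.drop_eq_nil_of_le (by omega)]
        rw [dif_pos h, dif_neg h2, ih (i + 1) (by omega),
          List.drop_eq_nil_of_le (by omega), hd1, uucMerge_short _ (by simp),
          uucMerge_short _ (by simp)]
    · rw [dif_neg h, List.drop_eq_nil_of_le (by omega), uucMerge_short _ (by simp)]

theorem uucLoopA_eq_merge (k : Nat) (xs : List String) (num : Nat) (h1 : 1 ≤ num)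
    (hk : xs.length - num ≤ k) :
    uucLoopA xs num = xs.take (num - 1) ++ uucMerge (xs.drop (num - 1)) := by
  induction k generalizing xs num with
  | zero =>
    have hge : ¬ num < xs.length := by omega
    rw [uucLoopA, dif_neg hge]
    rw [uucMerge_short _ (by simp; omega)]
    exact (List.take_append_drop _ _).symm
  | succ k ih =>
    by_cases h : num < xs.length
    · have hm1 : num - 1 < xs.length := by omega
      have hget : xs[num - 1]! = xs[num - 1]'hm1 := by
        rw [List.getElem!_eq_getElem?_getD, List.getElem?_eq_getElem hm1]; rfl
      have hsucc : num - 1 + 1 = num := by omega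
      have hdrop1 : xs.drop (num - 1) = xs[num - 1]'hm1 :: xs.drop num := by
        rw [List.drop_eq_getElem_cons hm1, hsucc]
      have hdrop2 : xs.drop num = xs[num]'h :: xs.drop (num + 1) :=
        List.drop_eq_getElem_cons h
      have htake : xs.take num = xs.take (num - 1) ++ [xs[num - 1]'hm1] := by
        conv_lhs => rw [← hsucc]
        rw [List.take_add_one, List.getElem?_eq_getElem hm1]; rfl
      rw [uucLoopA, dif_pos h, hget]
      by_cases hc : (pyStrIsupper (xs[num]'h) && pyStrIsupper (xs[num - 1]'hm1)) = true
      · rw [if_pos hc]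
        set t1 := xs[num]'h
        set t2 := xs[num - 1]'hm1
        have hxs' : (xs.eraseIdx num).set (num - 1) (t1 ++ t2)
            = (xs.take (num - 1) ++ [t1 ++ t2]) ++ xs.drop (num + 1) := by
          rw [List.eraseIdx_eq_take_drop_succ]
          rw [List.set_append_left _ _ (by simp; omega)]
          rw [htake]
          rw [List.set_append_right _ _ (by simp)]
          simp only [List.length_take]
          rw [show num - 1 - min (num - 1) xs.length = 0 from by omega]
          simp [List.set]
        have hlen' : ((xs.eraseIdx num).set (num - 1) (t1 ++ t2)).length = xs.length - 1 := by
          simp [List.length_eraseIdx, h]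
        rw [ih _ (num + 1) (by omega) (by omega)]
        rw [hxs']
        have hL : (xs.take (num - 1) ++ [t1 ++ t2]).length = num := by
          simp [List.length_take]; omega
        rw [show num + 1 - 1 = num from rfl]
        rw [List.take_left' hL, List.drop_left' hL]
        rw [hdrop1, hdrop2, uucMerge, if_pos (by rw [Bool.and_comm]; exact hc)]
        rw [List.append_assoc]
        rfl
      · rw [if_neg hc]
        rw [ih xs (num + 1) (by omega) (by omega)]
        rw [show num + 1 - 1 = num from rfl]
        rw [hdrop1]
        conv_rhs => rw [hdrop2]
        rw [uucMerge, if_neg (by rw [Bool.and_comm]; exact hc), ← hdrop2, htake]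
        rw [List.append_assoc]
        rfl
    · rw [uucLoopA, dif_neg h]
      rw [uucMerge_short _ (by simp; omega)]
      exact (List.take_append_drop _ _).symm

-- ===== VERDICT (by name: the statement is the Claim_ definition above) =====
theorem unit_upper_case_register_sequence_sentence_spec : Claim_equal_unit_upper_case_register_sequence_sentence := by
  intro xs _
  unfold Spec_unit_upper_case_register_sequence_sentence
  unfold unit_upper_case_register_sequence_sentence unit_upper_case_register_sequence_sentence_alt
  rw [uucLoopA_eq_merge xs.length xs 1 (by omega) (by omega), uucLoopB_eq_merge xs.length xs 0 (by omega)]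
  simp
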